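-- pv_equiv track=rewrite | github.com/yannickloth/W33-Theory | exploration/w33_explicit_curved_4d_complexes.py | permutation_closure
-- ===== SOURCE A (Python) =====
-- from collections import deque
--
-- Permutation = tuple[int, ...]
--
-- def compose_permutations(left: Permutation, right: Permutation) -> Permutation:
--     size = len(left) - 1
--     return tuple([0] + [left[right[index]] for index in range(1, size + 1)])
--
-- def permutation_closure(generators: tuple[Permutation, ...], size: int) -> tuple[Permutation, ...]:
--     identity = tuple(range(size + 1))
--     seen = {identity}
--     queue: deque[Permutation] = deque([identity])
--     while queue:
--         current = queue.popleft()
--         for generator in generators: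
--             image = compose_permutations(current, generator)
--             if image in seen:
--                 continue
--             seen.add(image)
--             queue.append(image)
--     return tuple(sorted(seen))
-- ===== SOURCE B (Python) =====
-- def permutation_closure(generators, size):
--     identity = tuple(range(size + 1))
--     seen = {identity}
--     while True:
--         new = seen | {
--             tuple([0] + [p[g[i]] for i in range(1, len(p))])
--             for p in seen
--             for g in generators
--         }
--         if len(new) == len(seen):
--             return tuple(sorted(seen))
--         seen = new
-- ===== Notes on version B (the rewrite author's own statement) =====
-- stated objective: alternative
-- what changed: Replaces A's deque-based single-visit BFS (pop one element, compose with each generator, push new images) by a round-based fixpoint with no queue and no helper: each round unions seen with the set comprehension of all compositions of every current element with every generator, and stops when the set size no longer grows; the sorted output is identical because the generated closure is order-independent.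
import Mathlib
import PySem

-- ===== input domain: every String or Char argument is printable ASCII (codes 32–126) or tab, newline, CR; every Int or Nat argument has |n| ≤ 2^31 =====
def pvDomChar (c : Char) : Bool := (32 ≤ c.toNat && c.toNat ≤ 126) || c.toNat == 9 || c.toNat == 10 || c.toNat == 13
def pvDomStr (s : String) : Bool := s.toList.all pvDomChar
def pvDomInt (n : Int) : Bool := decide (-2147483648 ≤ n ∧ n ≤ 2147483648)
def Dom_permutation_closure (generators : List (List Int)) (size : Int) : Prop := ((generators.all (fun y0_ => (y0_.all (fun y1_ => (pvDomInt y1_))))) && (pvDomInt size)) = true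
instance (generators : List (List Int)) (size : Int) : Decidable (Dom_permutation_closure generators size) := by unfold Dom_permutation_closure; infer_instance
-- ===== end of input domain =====

-- B replaces A's deque-based single-visit BFS by a queue-free round fixpoint (union the set of
-- all one-step images each round until the set stops growing); same return value, no speed claim.

-- fuel bound shared by both ports' totality guards (a guard only: the loops exit on their own)
def pvBound (size : Int) : Nat := ((max size 0).toNat + 2) ^ (max (size + 1).toNat 1)

def pvFuel (size : Int) : Nat := pvBound size + 1

def pvIdentity (size : Int) : List Int := PySem.List.pyRange 0 (size + 1)

-- ===== PORT A =====
-- compose_permutations: size = len(left) - 1 ; tuple([0] + [left[right[index]] for index in range(1, size+1)])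
def pvCompose (left right : List Int) : List Int :=
  0 :: (PySem.List.pyRange 1 (((left.length : Int) - 1) + 1)).map
      (fun index => (PySem.List.pyGet? left ((PySem.List.pyGet? right index).getD 0)).getD 0)

-- A's inner 'for generator in generators' loop, mutating (seen, queue)
def pvStep (c : List Int) (p : List (List Int) × List (List Int)) (g : List Int) :
    List (List Int) × List (List Int) :=
  let image := pvCompose c g
  if image ∈ p.1 then p else (PySem.Set.add p.1 image, p.2 ++ [image])

def pvInnerA (gens : List (List Int)) (c : List Int)
    (sq : List (List Int) × List (List Int)) : List (List Int) × List (List Int) :=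
  gens.foldl (pvStep c) sq

-- A's 'while queue:' loop: popleft, sweep the generators, continue
def pvLoopA (gens : List (List Int)) : Nat → List (List Int) → List (List Int) → List (List Int)
  | 0, seen, _ => seen
  | _ + 1, seen, [] => seen
  | n + 1, seen, c :: rest =>
      pvLoopA gens n (pvInnerA gens c (seen, rest)).1 (pvInnerA gens c (seen, rest)).2

def permutation_closure (generators : List (List Int)) (size : Int) : List (List Int) :=
  PySem.List.sorted (pvLoopA generators (pvFuel size) [pvIdentity size] [pvIdentity size])
    (fun x => x) false

-- ===== PORT B =====
-- the set comprehension {tuple([0] + [p[g[i]] for i in range(1, len(p))]) for p in seen for g in generators}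
def pvImages (gens seen : List (List Int)) : List (List Int) :=
  PySem.Set.ofList (seen.flatMap (fun p =>
    gens.map (fun g =>
      0 :: (PySem.List.pyRange 1 (p.length : Int)).map
        (fun i => (PySem.List.pyGet? p ((PySem.List.pyGet? g i).getD 0)).getD 0))))

-- B's 'while True:' round loop: new = seen | images; stop when the size does not grow
def pvLoopB (gens : List (List Int)) : Nat → List (List Int) → List (List Int)
  | 0, seen => seen
  | n + 1, seen =>
      let nw := (pvImages gens seen).foldl PySem.Set.add seen
      if nw.length = seen.length then seen else pvLoopB gens n nw

def permutation_closure_alt (generators : List (List Int)) (size : Int) : List (List Int) :=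
  PySem.List.sorted (pvLoopB generators (pvFuel size) [pvIdentity size]) (fun x => x) false

-- ===== PRECONDITION & SPEC =====
-- Pre_ excludes exactly the inputs where A raises IndexError: with size ≥ 1 some generator is
-- shorter than size+1 or carries an entry at positions 1..size that indexes outside a
-- (size+1)-tuple; on every other input A returns normally.
def Pre_permutation_closure (generators : List (List Int)) (size : Int) : Prop :=
  1 ≤ size → ∀ g ∈ generators, size + 1 ≤ (g.length : Int) ∧
    ∀ i ∈ PySem.List.pyRange 1 (size + 1),
      -(size + 1) ≤ (PySem.List.pyGet? g i).getD 0 ∧ (PySem.List.pyGet? g i).getD 0 ≤ size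
instance (generators : List (List Int)) (size : Int) : Decidable (Pre_permutation_closure generators size) := by unfold Pre_permutation_closure; infer_instance

def pvWitness_permutation_closure : List (List Int) × Int := ([[0, 2, 1]], 2)

def Spec_permutation_closure (generators : List (List Int)) (size : Int) (out : List (List Int)) : Prop := out = permutation_closure_alt generators size
instance (generators : List (List Int)) (size : Int) (out : List (List Int)) : Decidable (Spec_permutation_closure generators size out) := by unfold Spec_permutation_closure; infer_instance

-- ===== CLAIM (what is proved, stated in full; the proofs are below) =====
def Claim_equal_permutation_closure : Prop := ∀ (generators : List (List Int)) (size : Int), Dom_permutation_closure generators size → Pre_permutation_closure generators size → Spec_permutation_closure generators size (permutation_closure generators size)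

-- ===== LEMMAS AND PROOFS =====

-- the closure generated from the identity (proof-side characterisation of both results)
inductive pvReach (generators : List (List Int)) (size : Int) : List Int → Prop
  | id : pvReach generators size (pvIdentity size)
  | step {x g : List Int} : pvReach generators size x → g ∈ generators →
      pvReach generators size (pvCompose x g)

def pvUniv (size : Int) (x : List Int) : Prop :=
  (x.length = (size + 1).toNat ∨ x.length = 1) ∧ ∀ v ∈ x, 0 ≤ v ∧ v ≤ max size 0

def pvEnc (size : Int) (x : List Int) : Nat :=
  x.foldr (fun d a => a * ((max size 0).toNat + 2) + (d.toNat + 1)) 0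

lemma pvEnc_lt (size : Int) (x : List Int) (hx : ∀ v ∈ x, 0 ≤ v ∧ v ≤ max size 0) :
    pvEnc size x < ((max size 0).toNat + 2) ^ x.length := by
  induction x with
  | nil => simp [pvEnc]
  | cons d t ih =>
      have hd := hx d (by simp)
      have ht : pvEnc size t < ((max size 0).toNat + 2) ^ t.length :=
        ih (fun v hv => hx v (by simp [hv]))
      have hdb : d.toNat + 1 < (max size 0).toNat + 2 := by omega
      have : pvEnc size (d :: t) = pvEnc size t * ((max size 0).toNat + 2) + (d.toNat + 1) := rfl
      rw [this, List.length_cons, pow_succ]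
      calc pvEnc size t * ((max size 0).toNat + 2) + (d.toNat + 1)
          < (pvEnc size t + 1) * ((max size 0).toNat + 2) := by nlinarith
        _ ≤ ((max size 0).toNat + 2) ^ t.length * ((max size 0).toNat + 2) :=
            Nat.mul_le_mul_right _ (by omega)

lemma pvEnc_inj (size : Int) : ∀ (x y : List Int),
    (∀ v ∈ x, 0 ≤ v ∧ v ≤ max size 0) → (∀ v ∈ y, 0 ≤ v ∧ v ≤ max size 0) →
    pvEnc size x = pvEnc size y → x = y := by
  intro x
  induction x with
  | nil =>
      intro y _ _ he
      cases y with
      | nil => rfl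
      | cons c t => simp [pvEnc] at he
  | cons d s ih =>
      intro y hx hy he
      cases y with
      | nil => simp [pvEnc] at he
      | cons c t =>
          have h1 : pvEnc size (d :: s) = pvEnc size s * ((max size 0).toNat + 2) + (d.toNat + 1) := rfl
          have h2 : pvEnc size (c :: t) = pvEnc size t * ((max size 0).toNat + 2) + (c.toNat + 1) := rfl
          rw [h1, h2] at he
          have hd := hx d (by simp)
          have hc := hy c (by simp)
          have hdb : d.toNat + 1 < (max size 0).toNat + 2 := by omega
          have hcb : c.toNat + 1 < (max size 0).toNat + 2 := by omega
          have hmod := congrArg (· % ((max size 0).toNat + 2)) he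
          simp [Nat.mod_eq_of_lt hdb, Nat.mod_eq_of_lt hcb] at hmod
          have hdc : d = c := by omega
          have hst : pvEnc size s = pvEnc size t := by
            have hb : 0 < (max size 0).toNat + 2 := by omega
            have := he
            rw [hmod] at this
            have := Nat.add_right_cancel this
            exact Nat.eq_of_mul_eq_mul_right hb this
          have := ih t (fun v hv => hx v (by simp [hv])) (fun v hv => hy v (by simp [hv])) hst
          rw [hdc, this]

lemma pvCard_le (size : Int) (l : List (List Int)) (hn : l.Nodup)
    (hu : ∀ x ∈ l, pvUniv size x) : l.length ≤ pvBound size := by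
  have hmap : (l.map (pvEnc size)).Nodup :=
    (List.nodup_map_iff_inj_on hn).mpr
      (fun x hx y hy he => pvEnc_inj size x y (hu x hx).2 (hu y hy).2 he)
  have hlt : ∀ m ∈ l.map (pvEnc size), m < pvBound size := by
    intro m hm
    obtain ⟨x, hx, rfl⟩ := List.mem_map.mp hm
    have h1 := pvEnc_lt size x (hu x hx).2
    have h2 : ((max size 0).toNat + 2) ^ x.length ≤ pvBound size := by
      apply Nat.pow_le_pow_right (by omega)
      rcases (hu x hx).1 with h | h <;> simp <;> omega
    omega
  have hsub : (l.map (pvEnc size)).toFinset ⊆ Finset.range (pvBound size) := by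
    intro m hm
    exact Finset.mem_range.mpr (hlt m (List.mem_toFinset.mp hm))
  calc l.length = (l.map (pvEnc size)).length := by simp
    _ = (l.map (pvEnc size)).toFinset.card := (List.toFinset_card_of_nodup hmap).symm
    _ ≤ (Finset.range (pvBound size)).card := Finset.card_le_card hsub
    _ = pvBound size := Finset.card_range _

lemma pvCompose_length (c g : List Int) : (pvCompose c g).length = max c.length 1 := by
  simp [pvCompose, PySem.List.length_pyRange_one]
  omega

lemma pvCompose_mem' (c g : List Int) (v : Int) (hv : v ∈ pvCompose c g) : v = 0 ∨ v ∈ c := by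
  simp [pvCompose] at hv
  rcases hv with h | ⟨i, _, h⟩
  · exact Or.inl (by omega)
  · cases hw : PySem.List.pyGet? c ((PySem.List.pyGet? g i).getD 0) with
    | none => rw [hw] at h; simp at h; exact Or.inl (by omega)
    | some w =>
        rw [hw] at h
        simp at h
        subst h
        exact Or.inr (PySem.List.mem_of_pyGet?_eq_some c hw)

lemma pvUniv_compose (size : Int) (c g : List Int) (hc : pvUniv size c) :
    pvUniv size (pvCompose c g) := by
  constructor
  · rw [pvCompose_length]
    rcases hc.1 with h | h <;> omega
  · intro v hv
    rcases pvCompose_mem' c g v hv with rfl | hm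
    · exact ⟨le_refl 0, le_max_right _ _⟩
    · exact hc.2 v hm

lemma pvUniv_identity (size : Int) : pvUniv size (pvIdentity size) := by
  constructor
  · left
    simp [pvIdentity, PySem.List.length_pyRange_one]
  · intro v hv
    have := PySem.List.mem_pyRange_one.mp hv
    exact ⟨this.1, le_trans (by omega) (le_max_left size 0)⟩

-- the common postcondition both loops establish
def pvPost (gens : List (List Int)) (size : Int) (out : List (List Int)) : Prop :=
  out.Nodup ∧ pvIdentity size ∈ out ∧ (∀ x ∈ out, pvReach gens size x) ∧
  ∀ x ∈ out, ∀ g ∈ gens, pvCompose x g ∈ out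

lemma pvInnerA_spec (gens : List (List Int)) (c : List Int) :
    ∀ (s q : List (List Int)), ∃ δ : List (List Int),
      pvInnerA gens c (s, q) = (s ++ δ, q ++ δ) ∧ δ.Nodup ∧
      (∀ d ∈ δ, d ∉ s ∧ ∃ g ∈ gens, d = pvCompose c g) ∧
      (∀ g ∈ gens, pvCompose c g ∈ s ++ δ) := by
  induction gens with
  | nil => intro s q; exact ⟨[], by simp [pvInnerA], by simp, by simp, by simp⟩
  | cons g gs ih =>
      intro s q
      by_cases h : pvCompose c g ∈ s
      · have hstep : pvStep c (s, q) g = (s, q) := by simp [pvStep, h]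
        obtain ⟨δ, h1, h2, h3, h4⟩ := ih s q
        refine ⟨δ, ?_, h2, ?_, ?_⟩
        · simpa [pvInnerA, hstep] using h1
        · intro d hd
          obtain ⟨hns, g', hg', he⟩ := h3 d hd
          exact ⟨hns, g', List.mem_cons_of_mem _ hg', he⟩
        · intro g' hg'
          rcases List.mem_cons.mp hg' with rfl | hg'
          · exact List.mem_append.mpr (Or.inl h)
          · exact h4 g' hg'
      · have hstep : pvStep c (s, q) g = (s ++ [pvCompose c g], q ++ [pvCompose c g]) := by
          simp [pvStep, h]
        obtain ⟨δ, h1, h2, h3, h4⟩ := ih (s ++ [pvCompose c g]) (q ++ [pvCompose c g])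
        refine ⟨pvCompose c g :: δ, ?_, ?_, ?_, ?_⟩
        · have : pvInnerA (g :: gs) c (s, q) = pvInnerA gs c (s ++ [pvCompose c g], q ++ [pvCompose c g]) := by
            simp [pvInnerA, hstep]
          rw [this, h1]
          simp
        · refine List.nodup_cons.mpr ⟨?_, h2⟩
          intro hmem
          exact (h3 _ hmem).1 (by simp)
        · intro d hd
          rcases List.mem_cons.mp hd with rfl | hd
          · exact ⟨h, g, by simp⟩
          · obtain ⟨hns, g', hg', he⟩ := h3 d hd
            exact ⟨fun hds => hns (by simp [hds]), g', List.mem_cons_of_mem _ hg', he⟩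
        · intro g' hg'
          rcases List.mem_cons.mp hg' with rfl | hg'
          · simp
          · have := h4 g' hg'
            simpa [List.append_assoc] using this

-- the invariant A's loop maintains
def pvInvA (gens : List (List Int)) (size : Int) (seen queue : List (List Int)) : Prop :=
  seen.Nodup ∧ (∀ x ∈ seen, pvUniv size x) ∧ (∀ x ∈ queue, x ∈ seen) ∧
  pvIdentity size ∈ seen ∧ (∀ x ∈ seen, pvReach gens size x) ∧
  (∀ x ∈ seen, x ∈ queue ∨ ∀ g ∈ gens, pvCompose x g ∈ seen)

lemma pvStepA_facts (gens : List (List Int)) (size : Int) (seen : List (List Int))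
    (c : List Int) (rest : List (List Int)) (h : pvInvA gens size seen (c :: rest)) :
    pvInvA gens size (pvInnerA gens c (seen, rest)).1 (pvInnerA gens c (seen, rest)).2 ∧
    (pvInnerA gens c (seen, rest)).2.length + (pvBound size - (pvInnerA gens c (seen, rest)).1.length)
      < (c :: rest).length + (pvBound size - seen.length) := by
  obtain ⟨hnd, hun, hqs, hid, hre, hpr⟩ := h
  obtain ⟨δ, h1, h2, h3, h4⟩ := pvInnerA_spec gens c seen rest
  have hc : c ∈ seen := hqs c (by simp)
  have hδu : ∀ d ∈ δ, pvUniv size d := by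
    intro d hd
    obtain ⟨_, g, _, rfl⟩ := h3 d hd
    exact pvUniv_compose size c g (hun c hc)
  have hnd' : (seen ++ δ).Nodup := by
    refine List.Nodup.append hnd h2 ?_
    intro d hds hdδ
    exact (h3 d hdδ).1 hds
  have hun' : ∀ x ∈ seen ++ δ, pvUniv size x := by
    intro x hx
    rcases List.mem_append.mp hx with hx | hx
    · exact hun x hx
    · exact hδu x hx
  have hcard : (seen ++ δ).length ≤ pvBound size := pvCard_le size _ hnd' hun'
  constructor
  · rw [h1]
    refine ⟨hnd', hun', ?_, ?_, ?_, ?_⟩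
    · intro x hx
      rcases List.mem_append.mp hx with hx | hx
      · exact List.mem_append.mpr (Or.inl (hqs x (by simp [hx])))
      · exact List.mem_append.mpr (Or.inr hx)
    · exact List.mem_append.mpr (Or.inl hid)
    · intro x hx
      rcases List.mem_append.mp hx with hx | hx
      · exact hre x hx
      · obtain ⟨_, g, hg, rfl⟩ := h3 x hx
        exact pvReach.step (hre c hc) hg
    · intro x hx
      rcases List.mem_append.mp hx with hx | hx
      · rcases hpr x hx with hq | hcl
        · rcases List.mem_cons.mp hq with rfl | hq
          · exact Or.inr h4
          · exact Or.inl (List.mem_append.mpr (Or.inl hq))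
        · exact Or.inr (fun g hg => List.mem_append.mpr (Or.inl (hcl g hg)))
      · exact Or.inl (List.mem_append.mpr (Or.inr hx))
  · rw [h1]
    simp only [List.length_append, List.length_cons]
    have hsl : seen.length + δ.length ≤ pvBound size := by
      simpa [List.length_append] using hcard
    omega

lemma pvInvA_init (gens : List (List Int)) (size : Int) :
    pvInvA gens size [pvIdentity size] [pvIdentity size] := by
  refine ⟨List.nodup_singleton _, ?_, ?_, by simp, ?_, ?_⟩
  · intro x hx; rw [List.mem_singleton.mp hx]; exact pvUniv_identity size
  · intro x hx; exact hx
  · intro x hx; rw [List.mem_singleton.mp hx]; exact pvReach.id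
  · intro x hx; exact Or.inl hx

lemma pvInvA_exit (gens : List (List Int)) (size : Int) (seen : List (List Int))
    (h : pvInvA gens size seen []) : pvPost gens size seen :=
  ⟨h.1, h.2.2.2.1, h.2.2.2.2.1, fun x hx g hg =>
    ((h.2.2.2.2.2 x hx).resolve_left (by simp)) g hg⟩

lemma pvLoopA_post (gens : List (List Int)) (size : Int) :
    ∀ (n : Nat) (seen queue : List (List Int)), pvInvA gens size seen queue →
      queue.length + (pvBound size - seen.length) ≤ n →
      pvPost gens size (pvLoopA gens n seen queue) := by
  intro n
  induction n with
  | zero =>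
      intro seen queue h hm
      have hq : queue = [] := by
        cases queue with
        | nil => rfl
        | cons a t => simp at hm
      subst hq
      exact pvInvA_exit gens size seen h
  | succ n ih =>
      intro seen queue h hm
      cases queue with
      | nil => exact pvInvA_exit gens size seen h
      | cons c rest =>
          have hf := pvStepA_facts gens size seen c rest h
          exact ih _ _ hf.1 (by omega)

-- B-side lemmas -----------------------------------------------------------

lemma pvMem_foldl_add (l : List (List Int)) :
    ∀ (acc : List (List Int)) (x : List Int),
      x ∈ l.foldl PySem.Set.add acc ↔ x ∈ acc ∨ x ∈ l := by
  induction l with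
  | nil => intro acc x; simp
  | cons a t ih =>
      intro acc x
      rw [List.foldl_cons, ih, PySem.Set.mem_add]
      constructor
      · rintro ((h | rfl) | h)
        · exact Or.inl h
        · exact Or.inr (by simp)
        · exact Or.inr (by simp [h])
      · rintro (h | h)
        · exact Or.inl (Or.inl h)
        · rcases List.mem_cons.mp h with rfl | h
          · exact Or.inl (Or.inr rfl)
          · exact Or.inr h

lemma pvNodup_foldl_add (l : List (List Int)) :
    ∀ (acc : List (List Int)), acc.Nodup → (l.foldl PySem.Set.add acc).Nodup := by
  induction l with
  | nil => intro acc h; simpa using h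
  | cons a t ih => intro acc h; exact ih _ (PySem.Set.nodup_add acc a h)

lemma pvImages_mem (gens seen : List (List Int)) (x : List Int) :
    x ∈ pvImages gens seen ↔ ∃ p ∈ seen, ∃ g ∈ gens, x = pvCompose p g := by
  unfold pvImages
  rw [PySem.Set.mem_ofList]
  simp only [List.mem_flatMap, List.mem_map]
  constructor
  · rintro ⟨p, hp, g, hg, rfl⟩
    exact ⟨p, hp, g, hg, by simp [pvCompose]⟩
  · rintro ⟨p, hp, g, hg, rfl⟩
    exact ⟨p, hp, g, hg, by simp [pvCompose]⟩

-- the invariant B's round loop maintains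
def pvInvB (gens : List (List Int)) (size : Int) (seen : List (List Int)) : Prop :=
  seen.Nodup ∧ (∀ x ∈ seen, pvUniv size x) ∧ pvIdentity size ∈ seen ∧
  ∀ x ∈ seen, pvReach gens size x

lemma pvInvB_init (gens : List (List Int)) (size : Int) :
    pvInvB gens size [pvIdentity size] := by
  refine ⟨List.nodup_singleton _, ?_, by simp, ?_⟩
  · intro x hx; rw [List.mem_singleton.mp hx]; exact pvUniv_identity size
  · intro x hx; rw [List.mem_singleton.mp hx]; exact pvReach.id

lemma pvLoopB_post (gens : List (List Int)) (size : Int) :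
    ∀ (n : Nat) (seen : List (List Int)), pvInvB gens size seen →
      pvBound size + 1 - seen.length ≤ n →
      pvPost gens size (pvLoopB gens n seen) := by
  intro n
  induction n with
  | zero =>
      intro seen h hm
      have := pvCard_le size seen h.1 h.2.1
      omega
  | succ n ih =>
      intro seen h hm
      obtain ⟨hnd, hun, hid, hre⟩ := h
      have hsub : seen ⊆ (pvImages gens seen).foldl PySem.Set.add seen := by
        intro x hx
        exact (pvMem_foldl_add _ seen x).mpr (Or.inl hx)
      have hsp : seen.Subperm ((pvImages gens seen).foldl PySem.Set.add seen) :=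
        List.Nodup.subperm hnd hsub
      show pvPost gens size (pvLoopB gens (n + 1) seen)
      rw [pvLoopB]
      by_cases hlen : ((pvImages gens seen).foldl PySem.Set.add seen).length = seen.length
      · simp only [hlen, if_pos]
        have hperm : seen.Perm ((pvImages gens seen).foldl PySem.Set.add seen) :=
          hsp.perm_of_length_le (by omega)
        refine ⟨hnd, hid, hre, ?_⟩
        intro x hx g hg
        have : pvCompose x g ∈ (pvImages gens seen).foldl PySem.Set.add seen :=
          (pvMem_foldl_add _ seen _).mpr
            (Or.inr ((pvImages_mem gens seen _).mpr ⟨x, hx, g, hg, rfl⟩))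
        exact hperm.mem_iff.mpr this
      · simp only [if_neg hlen]
        have hlt : seen.length < ((pvImages gens seen).foldl PySem.Set.add seen).length := by
          have := hsp.length_le
          omega
        refine ih _ ⟨pvNodup_foldl_add _ seen hnd, ?_, ?_, ?_⟩ (by omega)
        · intro x hx
          rcases (pvMem_foldl_add _ seen x).mp hx with hx | hx
          · exact hun x hx
          · obtain ⟨p, hp, g, _, rfl⟩ := (pvImages_mem gens seen x).mp hx
            exact pvUniv_compose size p g (hun p hp)
        · exact (pvMem_foldl_add _ seen _).mpr (Or.inl hid)
        · intro x hx
          rcases (pvMem_foldl_add _ seen x).mp hx with hx | hx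
          · exact hre x hx
          · obtain ⟨p, hp, g, hg, rfl⟩ := (pvImages_mem gens seen x).mp hx
            exact pvReach.step (hre p hp) hg

-- both postconditions pin the same set, hence the same sorted list ---------

lemma pvPost_reach (gens : List (List Int)) (size : Int) (out : List (List Int))
    (h : pvPost gens size out) : ∀ x, x ∈ out ↔ pvReach gens size x := by
  intro x
  constructor
  · exact h.2.2.1 x
  · intro hr
    induction hr with
    | id => exact h.2.1
    | step hx hg ih => exact h.2.2.2 _ ih _ hg

lemma pvPost_sorted_eq (gens : List (List Int)) (size : Int) (la lb : List (List Int))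
    (ha : pvPost gens size la) (hb : pvPost gens size lb) :
    PySem.List.sorted la (fun x => x) false = PySem.List.sorted lb (fun x => x) false := by
  have hm : ∀ x, x ∈ la ↔ x ∈ lb :=
    fun x => (pvPost_reach gens size la ha x).trans (pvPost_reach gens size lb hb x).symm
  have hp : la.Perm lb := (List.perm_ext_iff_of_nodup ha.1 hb.1).mpr hm
  have h := PySem.List.sorted_eq_sorted_of_perm la lb (fun a => a) (fun a b hab => hab) hp
  have hi : (fun a b => a.decidableLT b : DecidableLT (List ℤ)) =
      (@LinearOrder.toDecidableLT _ List.instLinearOrder) := Subsingleton.elim _ _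
  rw [show (fun x : List ℤ => x) = (fun a : List ℤ => a) from rfl, hi]
  exact h

-- ===== VERDICT (by name: the statement is the Claim_ definition above) =====
theorem permutation_closure_spec : Claim_equal_permutation_closure := by
  intro generators size _ _
  unfold Spec_permutation_closure permutation_closure permutation_closure_alt
  refine pvPost_sorted_eq generators size _ _ ?_ ?_
  · exact pvLoopA_post generators size (pvFuel size) _ _ (pvInvA_init generators size)
      (by unfold pvFuel; simp; omega)
  · exact pvLoopB_post generators size (pvFuel size) _ (pvInvB_init generators size)
      (by unfold pvFuel; simp)
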